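-- pv_equiv track=rewrite | github.com/agrawalprayer/the_polycube_model | utils/genotype_utils.py | unflatten_list
-- ===== SOURCE A (Python) =====
-- import string
--
-- def unflatten_list(flat_list):
--     """
--     Convert a flat list of sides back into a dictionary format with tile names A-Z.
--
--     Args:
--         - flat_list (list): The flattened list of sides.
--
--     Returns:
--         - tile_dict (dict): Dictionary where keys are tile names (A-Z) and values are lists of sides.
--     """
--     sides_per_tile = 6
--     num_tiles = len(flat_list) // sides_per_tile
--
--     if len(flat_list) % sides_per_tile != 0:
--         raise ValueError("Flat list size is not a multiple of 6.")
--
--     tile_names = list(string.ascii_uppercase[:num_tiles])  # Generate 'A', 'B', 'C', etc.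
--     tile_dict = {tile_names[i]: flat_list[i * sides_per_tile : (i + 1) * sides_per_tile] for i in range(num_tiles)}
--
--     # Ensure all values in tile_dict are in two-digit format
--     for key in tile_dict:
--         tile_dict[key] = [f"{int(side):02d}" for side in tile_dict[key]]
--     return tile_dict
-- ===== SOURCE B (Python) =====
-- import string
--
-- def unflatten_list(flat_list):
--     if len(flat_list) % 6 != 0:
--         raise ValueError("Flat list size is not a multiple of 6.")
--     names = iter(string.ascii_uppercase)
--     tile_dict = {}
--     rest = flat_list
--     while rest:
--         chunk, rest = rest[:6], rest[6:]
--         tile_dict[next(names)] = [f"{int(side):02d}" for side in chunk]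
--     return tile_dict
-- ===== Notes on version B (the rewrite author's own statement) =====
-- stated objective: simpler
-- what changed: B consumes the list head-first with take/drop destructuring and an iterator over the letters, formatting each chunk as it goes, instead of A's index-arithmetic dict comprehension over range(num_tiles) followed by a second reformatting pass over the dict.
import Mathlib
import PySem

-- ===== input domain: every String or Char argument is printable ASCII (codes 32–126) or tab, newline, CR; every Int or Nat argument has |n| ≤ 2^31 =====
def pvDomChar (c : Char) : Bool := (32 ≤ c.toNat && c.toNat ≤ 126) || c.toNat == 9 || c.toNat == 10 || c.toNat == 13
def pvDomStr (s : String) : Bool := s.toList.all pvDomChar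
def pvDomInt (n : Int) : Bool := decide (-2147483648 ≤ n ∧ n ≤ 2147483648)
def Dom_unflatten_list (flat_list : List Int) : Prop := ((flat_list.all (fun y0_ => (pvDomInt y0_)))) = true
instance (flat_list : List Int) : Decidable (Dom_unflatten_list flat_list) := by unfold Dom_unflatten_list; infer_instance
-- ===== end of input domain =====

-- B restructures A (head-first take/drop chunking in one pass) rather than indexed slicing + a second
-- reformatting pass; objective: simpler. Equivalence is about the return value; neither mutates its input.

-- f"{int(side):02d}": str(n) zero-padded on the left to width 2 (a negative's repr is already ≥ 2 chars)
def pvFmt02 (n : Int) : String :=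
  let cs := PySem.Int.toChars n
  String.ofList (if cs.length < 2 then '0' :: cs else cs)

-- string.ascii_uppercase
def pvAsciiUppercase : List Char :=
  ['A','B','C','D','E','F','G','H','I','J','K','L','M',
   'N','O','P','Q','R','S','T','U','V','W','X','Y','Z']

-- ===== PORT A =====
def unflatten_list (flat_list : List Int) : List (String × List String) :=
  let num_tiles : Nat := flat_list.length / 6
  if flat_list.length % 6 ≠ 0 then []  -- raise ValueError: excluded by Pre_
  else
    -- tile_names = list(string.ascii_uppercase[:num_tiles])
    let tile_names : List String := (pvAsciiUppercase.take num_tiles).map (fun c => String.ofList [c])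
    -- {tile_names[i]: flat_list[i*6:(i+1)*6] for i in range(num_tiles)}
    -- tile_names[i] out of range = IndexError, excluded by Pre_ (getD "" there)
    let tile_dict : List (String × List Int) :=
      (List.range num_tiles).map (fun i =>
        (tile_names.getD i "",
         PySem.List.slice flat_list (some ((i : Int) * 6)) (some (((i : Int) + 1) * 6))))
    -- for key in tile_dict: tile_dict[key] = [f"{int(side):02d}" for side in tile_dict[key]]
    tile_dict.map (fun kv => (kv.1, kv.2.map pvFmt02))

-- ===== PORT B =====
-- while rest: chunk, rest = rest[:6], rest[6:]; tile_dict[next(names)] = [f"{int(side):02d}" for side in chunk]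
-- next() on an exhausted iterator = StopIteration, excluded by Pre_ (headD 'A' there)
def pvChunkLoop (names : List Char) (rest : List Int) : List (String × List String) :=
  match rest with
  | [] => []
  | x :: rest' =>
    (String.ofList [names.headD 'A'], ((x :: rest').take 6).map pvFmt02)
      :: pvChunkLoop names.tail ((x :: rest').drop 6)
termination_by rest.length
decreasing_by simp

def unflatten_list_alt (flat_list : List Int) : List (String × List String) :=
  if flat_list.length % 6 ≠ 0 then []  -- raise ValueError: excluded by Pre_
  else pvChunkLoop pvAsciiUppercase flat_list

-- ===== PRECONDITION & SPEC =====
-- A raises ValueError when the length is not a multiple of 6, and IndexError past 26 tiles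
-- (B raises StopIteration there); Pre_ excludes exactly those inputs.
def Pre_unflatten_list (flat_list : List Int) : Prop :=
  flat_list.length % 6 = 0 ∧ flat_list.length ≤ 156

instance (flat_list : List Int) : Decidable (Pre_unflatten_list flat_list) := by
  unfold Pre_unflatten_list; infer_instance

def pvWitness_unflatten_list : List Int := [1, 2, 3, 4, 5, 6, -5, 100, 0, 7, 8, 9]

def Spec_unflatten_list (flat_list : List Int) (out : List (String × List String)) : Prop :=
  out = unflatten_list_alt flat_list
instance (flat_list : List Int) (out : List (String × List String)) : Decidable (Spec_unflatten_list flat_list out) := by unfold Spec_unflatten_list; infer_instance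

-- ===== CLAIM (what is proved, stated in full; the proofs are below) =====
def Claim_equal_unflatten_list : Prop := ∀ (flat_list : List Int), Dom_unflatten_list flat_list → Pre_unflatten_list flat_list → Spec_unflatten_list flat_list (unflatten_list flat_list)

-- ===== LEMMAS AND PROOFS =====

-- A's i-th slice is the i-th chunk
lemma pv_slice_chunk (xs : List Int) (i : Nat) :
    PySem.List.slice xs (some ((i : Int) * 6)) (some (((i : Int) + 1) * 6))
      = (xs.drop (6 * i)).take 6 := by
  have h1 : ((6 * i : Nat) : Int) = (i : Int) * 6 := by push_cast; ring
  have h2 : ((6 * i : Nat) : Int) + ((6 : Nat) : Int) = ((i : Int) + 1) * 6 := by push_cast; ring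
  rw [← h2, ← h1]
  exact PySem.List.slice_natCast_add xs (6 * i) 6

-- A's range-indexed chunk map equals B's head-first loop
lemma pv_main (t : Nat) (cs : List Char) (xs : List Int)
    (hlen : xs.length = 6 * t) (hcs : t ≤ cs.length) :
    (List.range t).map (fun i =>
      (((cs.take t).map (fun c => String.ofList [c])).getD i "",
       (PySem.List.slice xs (some ((i : Int) * 6)) (some (((i : Int) + 1) * 6))).map pvFmt02))
      = pvChunkLoop cs xs := by
  induction t generalizing cs xs with
  | zero =>
    have : xs = [] := by
      cases xs with
      | nil => rfl
      | cons a l => simp at hlen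
    subst this
    rw [pvChunkLoop]
    simp
  | succ t ih =>
    obtain ⟨x, rest', rfl⟩ : ∃ x rest', xs = x :: rest' := by
      cases xs with
      | nil => simp at hlen
      | cons a l => exact ⟨a, l, rfl⟩
    obtain ⟨c, cs', rfl⟩ : ∃ c cs', cs = c :: cs' := by
      cases cs with
      | nil => simp at hcs
      | cons a l => exact ⟨a, l, rfl⟩
    rw [List.range_succ_eq_map, pvChunkLoop]
    simp only [List.map_cons, List.map_map]
    congr 1
    · -- head
      rw [pv_slice_chunk]
      simp
    · -- tail
      rw [show ((x :: rest').drop 6) = rest'.drop 5 by simp]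
      have hlen' : (rest'.drop 5).length = 6 * t := by
        simp at hlen ⊢; omega
      have hcs' : t ≤ cs'.length := by simp at hcs; omega
      simp only [List.tail_cons]
      rw [← ih cs' (rest'.drop 5) hlen' hcs']
      apply List.map_congr_left
      intro i hi
      simp only [Function.comp]
      refine congrArg₂ Prod.mk ?_ ?_
      · -- keys shift by one
        simp
      · -- chunks shift by six
        rw [pv_slice_chunk, pv_slice_chunk]
        have : (x :: rest').drop (6 * (i + 1)) = (rest'.drop 5).drop (6 * i) := by
          rw [List.drop_drop]
          rw [show 6 * (i + 1) = (6 * i + 5) + 1 by omega, List.drop_succ_cons]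
          congr 1
          omega
        rw [this]

-- ===== VERDICT (by name: the statement is the Claim_ definition above) =====
theorem unflatten_list_spec : Claim_equal_unflatten_list := by
  intro flat_list _ hpre
  obtain ⟨hm, hle⟩ := hpre
  unfold Spec_unflatten_list unflatten_list unflatten_list_alt
  simp only [hm, ne_eq, not_true_eq_false, if_false, List.map_map]
  have hlen : flat_list.length = 6 * (flat_list.length / 6) := by omega
  have hcs : flat_list.length / 6 ≤ pvAsciiUppercase.length := by
    simp [pvAsciiUppercase]; omega
  rw [← pv_main (flat_list.length / 6) pvAsciiUppercase flat_list hlen hcs]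
  apply List.map_congr_left
  intro i hi
  simp [Function.comp]
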